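-- pv_equiv track=rewrite | github.com/sjerzykiewicz/advent_of_code | 2022/Day_14/main.py | generate_rocks
-- ===== SOURCE A (Python) =====
-- def generate_rocks(rocks, line, max_y, min_x, max_x):
--     path = line.split(" -> ")
--     for i in range(len(path) - 1):
--         x1, y1 = path[i].split(",")
--         x2, y2 = path[i + 1].split(",")
--         x1, y1, x2, y2 = int(x1), int(y1), int(x2), int(y2)
--         sx = 1 if x1 <= x2 else -1
--         sy = 1 if y1 <= y2 else -1
--         for x in range(x1, x2 + sx, sx):
--             for y in range(y1, y2 + sy, sy):
--                 rocks.add((x, y))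
--                 if y > max_y:
--                     max_y = y
--             if x > max_x:
--                 max_x = x
--             if x < min_x:
--                 min_x = x
--     return rocks, max_y, min_x, max_x
-- ===== SOURCE B (Python) =====
-- def generate_rocks(rocks, line, max_y, min_x, max_x):
--     pts = line.split(" -> ")
--     if len(pts) > 1:
--         pts = [tuple(map(int, p.split(","))) for p in pts]
--         for (x1, y1), (x2, y2) in zip(pts, pts[1:]):
--             sx = 1 if x2 >= x1 else -1
--             sy = 1 if y2 >= y1 else -1
--             h = abs(y2 - y1) + 1
--             w = abs(x2 - x1) + 1
--             rocks.update((x1 + sx * (k // h), y1 + sy * (k % h))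
--                          for k in range(w * h))
--         max_y = max([max_y] + [y for _, y in pts])
--         min_x = min([min_x] + [x for x, _ in pts])
--         max_x = max([max_x] + [x for x, _ in pts])
--     return rocks, max_y, min_x, max_x
-- ===== Notes on version B (the rewrite author's own statement) =====
-- stated objective: alternative
-- what changed: B parses the whole path once into integer points, enumerates each segment's spanned rectangle with a single flat index loop using divmod arithmetic (x1+sx*(k//h), y1+sy*(k%h)) instead of A's nested directional x/y loops, and computes max_y/min_x/max_x in one global pass over all parsed endpoints instead of per-cell comparisons inside the loops.
import Mathlib
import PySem

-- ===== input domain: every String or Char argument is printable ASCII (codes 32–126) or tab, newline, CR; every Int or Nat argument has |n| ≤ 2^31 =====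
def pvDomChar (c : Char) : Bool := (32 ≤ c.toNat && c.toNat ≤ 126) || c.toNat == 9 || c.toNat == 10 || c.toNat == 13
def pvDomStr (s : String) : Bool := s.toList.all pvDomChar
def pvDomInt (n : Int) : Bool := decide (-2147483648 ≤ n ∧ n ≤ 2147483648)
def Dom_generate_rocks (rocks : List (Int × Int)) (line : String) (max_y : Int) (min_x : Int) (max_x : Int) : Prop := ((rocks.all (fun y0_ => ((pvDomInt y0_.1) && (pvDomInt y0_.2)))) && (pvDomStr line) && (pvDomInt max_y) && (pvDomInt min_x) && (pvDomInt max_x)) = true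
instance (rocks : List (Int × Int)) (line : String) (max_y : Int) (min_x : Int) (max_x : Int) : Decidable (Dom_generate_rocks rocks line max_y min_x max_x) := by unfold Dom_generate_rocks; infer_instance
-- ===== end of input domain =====

-- B parses the path once into integer points, enumerates each segment's spanned rectangle
-- by a single flat index with divmod arithmetic instead of nested directional loops, and
-- computes max_y/min_x/max_x in one global pass over the parsed endpoints (objective:
-- alternative).  Both A and B mutate the Python set `rocks` in place; the equivalence
-- proved here is about the returned value (which is that same set).

-- shared helper: "x,y" -> (int(x), int(y)); none exactly where Python raises (ValueError)
def pvParsePt (s : String) : Option (Int × Int) :=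
  match (PySem.Str.split? s ",").getD [] with
  | [a, b] =>
    match PySem.Int.ofStr? a, PySem.Int.ofStr? b with
    | some x, some y => some (x, y)
    | _, _ => none
  | _ => none

-- ===== PORT A =====
def generate_rocks (rocks : List (Int × Int)) (line : String) (max_y : Int) (min_x : Int) (max_x : Int) : (List (Int × Int)) × Int × Int × Int :=
  let path := (PySem.Str.split? line " -> ").getD []   -- sep ≠ "" so split? is some
  (PySem.List.pyRange 0 ((path.length : Int) - 1) 1).foldl (fun st i =>
    match (PySem.List.pyGet? path i).bind pvParsePt,
          (PySem.List.pyGet? path (i + 1)).bind pvParsePt with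
    | some (x1, y1), some (x2, y2) =>
      let sx : Int := if x1 ≤ x2 then 1 else -1
      let sy : Int := if y1 ≤ y2 then 1 else -1
      (PySem.List.pyRange x1 (x2 + sx) sx).foldl (fun st x =>
        let inner := (PySem.List.pyRange y1 (y2 + sy) sy).foldl (fun st y =>
          (PySem.Set.add st.1 (x, y), if y > st.2 then y else st.2)) (st.1, st.2.1)
        (inner.1, inner.2,
         (if x < st.2.2.1 then x else st.2.2.1),
         (if x > st.2.2.2 then x else st.2.2.2))) st
    | _, _ => st   -- unreachable under Pre_ (Python raises ValueError there)
    ) (rocks, max_y, min_x, max_x)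

-- ===== PORT B =====
-- B parses every point of the path up front (the comprehension over line.split)
def pvParseAll : List String → Option (List (Int × Int))
  | [] => some []
  | p :: t =>
    match pvParsePt p, pvParseAll t with
    | some xy, some r => some (xy :: r)
    | _, _ => none

-- the generator in B's rocks.update: flat index k over the w*h rectangle, divmod into x/y
def pvCells (x1 y1 x2 y2 : Int) : List (Int × Int) :=
  let sx : Int := if x2 ≥ x1 then 1 else -1
  let sy : Int := if y2 ≥ y1 then 1 else -1
  let h : Int := |y2 - y1| + 1
  let w : Int := |x2 - x1| + 1
  (PySem.List.pyRange 0 (w * h) 1).map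
    (fun k => (x1 + sx * PySem.Int.floordiv k h, y1 + sy * PySem.Int.mod k h))

def generate_rocks_alt (rocks : List (Int × Int)) (line : String) (max_y : Int) (min_x : Int) (max_x : Int) : (List (Int × Int)) × Int × Int × Int :=
  let pts0 := (PySem.Str.split? line " -> ").getD []
  if pts0.length > 1 then
    match pvParseAll pts0 with
    | some pts =>
      ((pts.zip pts.tail).foldl
         (fun r pq => PySem.Set.update r (pvCells pq.1.1 pq.1.2 pq.2.1 pq.2.2)) rocks,
       (pts.map Prod.snd).foldl max max_y,
       (pts.map Prod.fst).foldl min min_x,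
       (pts.map Prod.fst).foldl max max_x)
    | none => (rocks, max_y, min_x, max_x)   -- unreachable under Pre_ (Python raises ValueError there)
  else (rocks, max_y, min_x, max_x)

-- ===== PRECONDITION & SPEC =====
-- Pre_ excludes exactly the inputs on which the Python raises ValueError while parsing:
-- whenever the path has at least two points, every point must be "<int>,<int>".
def Pre_generate_rocks (rocks : List (Int × Int)) (line : String) (max_y : Int) (min_x : Int) (max_x : Int) : Prop :=
  ((PySem.Str.split? line " -> ").getD []).length ≤ 1 ∨
  ∀ p ∈ (PySem.Str.split? line " -> ").getD [], (pvParsePt p).isSome = true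
instance (rocks : List (Int × Int)) (line : String) (max_y : Int) (min_x : Int) (max_x : Int) : Decidable (Pre_generate_rocks rocks line max_y min_x max_x) := by unfold Pre_generate_rocks; infer_instance

def pvWitness_generate_rocks : (List (Int × Int)) × String × Int × Int × Int :=
  ([(0, 0)], "0,0 -> 2,1", 0, 0, 0)

def Spec_generate_rocks (rocks : List (Int × Int)) (line : String) (max_y : Int) (min_x : Int) (max_x : Int) (out : (List (Int × Int)) × Int × Int × Int) : Prop := out = generate_rocks_alt rocks line max_y min_x max_x
instance (rocks : List (Int × Int)) (line : String) (max_y : Int) (min_x : Int) (max_x : Int) (out : (List (Int × Int)) × Int × Int × Int) : Decidable (Spec_generate_rocks rocks line max_y min_x max_x out) := by unfold Spec_generate_rocks; infer_instance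

-- ===== CLAIM (what is proved, stated in full; the proofs are below) =====
def Claim_equal_generate_rocks : Prop := ∀ (rocks : List (Int × Int)) (line : String) (max_y : Int) (min_x : Int) (max_x : Int), Dom_generate_rocks rocks line max_y min_x max_x → Pre_generate_rocks rocks line max_y min_x max_x → Spec_generate_rocks rocks line max_y min_x max_x (generate_rocks rocks line max_y min_x max_x)

-- ===== LEMMAS AND PROOFS =====

theorem pv_witness_ok :
    Dom_generate_rocks pvWitness_generate_rocks.1 pvWitness_generate_rocks.2.1
      pvWitness_generate_rocks.2.2.1 pvWitness_generate_rocks.2.2.2.1 pvWitness_generate_rocks.2.2.2.2 ∧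
    Pre_generate_rocks pvWitness_generate_rocks.1 pvWitness_generate_rocks.2.1
      pvWitness_generate_rocks.2.2.1 pvWitness_generate_rocks.2.2.2.1 pvWitness_generate_rocks.2.2.2.2 := by
  constructor <;> decide

-- proof-side abbreviation: A's inclusive directional span
def pvSpan (a b : Int) : List Int :=
  if a ≤ b then PySem.List.pyRange a (b + 1) 1 else PySem.List.pyRange a (b - 1) (-1)

theorem pv_mem_span {a b x : Int} : x ∈ pvSpan a b ↔ min a b ≤ x ∧ x ≤ max a b := by
  unfold pvSpan
  split <;>
    simp [PySem.List.mem_pyRange_one, PySem.List.mem_pyRange_neg_one] <;> omega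

theorem pv_span_ne_nil (a b : Int) : pvSpan a b ≠ [] := by
  intro h
  have : a ∈ pvSpan a b := pv_mem_span.mpr (by constructor <;> omega)
  simp [h] at this

-- the span, written as a map over List.range
theorem pv_span_eq_map (a b : Int) :
    pvSpan a b = (List.range ((b - a).natAbs + 1)).map
      (fun i : Nat => a + (if a ≤ b then 1 else -1) * (i : Int)) := by
  unfold pvSpan
  by_cases h : a ≤ b
  · have h1 : (b + 1 - a).toNat = (b - a).natAbs + 1 := by omega
    simp only [if_pos h, PySem.List.pyRange_one, h1]
    exact List.map_congr_left (fun i _ => by simp [h])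
  · have h1 : (a - (b - 1)).toNat = (b - a).natAbs + 1 := by omega
    simp only [if_neg h, PySem.List.pyRange_neg_one, h1]
    exact List.map_congr_left (fun i _ => by simp [h]; omega)

-- flattened index enumeration of a grid = nested enumeration
theorem pv_range_mul {α : Type} (g : Nat → Nat → α) (ny : Nat) (hny : 0 < ny) :
    ∀ nx : Nat, (List.range (nx * ny)).map (fun k => g (k / ny) (k % ny))
      = (List.range nx).flatMap (fun i => (List.range ny).map (g i)) := by
  intro nx
  induction nx with
  | zero => simp
  | succ n ih =>
    have : (n + 1) * ny = n * ny + ny := by ring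
    rw [this, List.range_add, List.map_append, ih, List.range_succ, List.flatMap_append]
    congr 1
    simp only [List.flatMap_singleton, List.map_map]
    refine List.map_congr_left (fun j hj => ?_)
    have hj' : j < ny := List.mem_range.mp hj
    have hdiv : (n * ny + j) / ny = n := by
      rw [Nat.add_comm, Nat.add_mul_div_right _ _ hny, Nat.div_eq_of_lt hj']; omega
    have hmod : (n * ny + j) % ny = j := by
      rw [Nat.add_comm, Nat.add_mul_mod_self_right, Nat.mod_eq_of_lt hj']
    simp [Function.comp, hdiv, hmod]

-- B's flat divmod cell list = the flatMap of A's directional spans (same order)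
theorem pv_cells_eq (x1 y1 x2 y2 : Int) :
    pvCells x1 y1 x2 y2
      = (pvSpan x1 x2).flatMap (fun x => (pvSpan y1 y2).map (fun y => (x, y))) := by
  unfold pvCells
  set nx : Nat := (x2 - x1).natAbs + 1 with hnx
  set ny : Nat := (y2 - y1).natAbs + 1 with hny
  have hw : |x2 - x1| + 1 = (nx : Int) := by rw [hnx]; push_cast; omega
  have hh : |y2 - y1| + 1 = (ny : Int) := by rw [hny]; push_cast; omega
  have hsx : (if x2 ≥ x1 then (1 : Int) else -1) = (if x1 ≤ x2 then 1 else -1) := by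
    simp [ge_iff_le]
  have hsy : (if y2 ≥ y1 then (1 : Int) else -1) = (if y1 ≤ y2 then 1 else -1) := by
    simp [ge_iff_le]
  simp only [hw, hh, hsx, hsy]
  have hrange : PySem.List.pyRange 0 ((nx : Int) * (ny : Int)) 1
      = (List.range (nx * ny)).map (fun k => ((k : Nat) : Int)) := by
    rw [PySem.List.pyRange_one]
    have : ((nx : Int) * (ny : Int) - 0).toNat = nx * ny := by push_cast; omega
    rw [this]
    exact List.map_congr_left (fun i _ => by omega)
  rw [hrange, List.map_map]
  have hstep : ((fun k : Int => (x1 + (if x1 ≤ x2 then 1 else -1) * PySem.Int.floordiv k (ny : Int),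
        y1 + (if y1 ≤ y2 then 1 else -1) * PySem.Int.mod k (ny : Int))) ∘ fun k : Nat => ((k : Nat) : Int))
      = fun k : Nat => ((fun i j : Nat => (x1 + (if x1 ≤ x2 then 1 else -1) * (i : Int),
          y1 + (if y1 ≤ y2 then 1 else -1) * (j : Int))) (k / ny) (k % ny)) := by
    funext k
    simp [Function.comp, PySem.Int.floordiv_natCast, PySem.Int.mod_natCast]
  rw [hstep, pv_range_mul (fun i j : Nat => (x1 + (if x1 ≤ x2 then 1 else -1) * (i : Int),
      y1 + (if y1 ≤ y2 then 1 else -1) * (j : Int))) ny (by omega) nx]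
  rw [pv_span_eq_map x1 x2, pv_span_eq_map y1 y2, List.flatMap_map]
  refine List.flatMap_congr (fun i _ => ?_)
  rw [List.map_map]
  rfl

-- running max over a span = max of the endpoints
theorem pv_span_foldl_max (a b m : Int) :
    (pvSpan a b).foldl max m = max m (max a b) := by
  have h1 := PySem.List.le_foldl_max (pvSpan a b) m
  have h2 := PySem.List.foldl_max_mem (pvSpan a b) m
  have ha : a ∈ pvSpan a b := pv_mem_span.mpr (by constructor <;> omega)
  have hb : b ∈ pvSpan a b := pv_mem_span.mpr (by constructor <;> omega)
  have hA := h1.2 a ha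
  have hB := h1.2 b hb
  rcases h2 with h2 | h2
  · omega
  · have := pv_mem_span.mp h2
    omega

theorem pv_span_foldl_min (a b m : Int) :
    (pvSpan a b).foldl min m = min m (min a b) := by
  have h1 := PySem.List.foldl_min_le (pvSpan a b) m
  have h2 := PySem.List.foldl_min_mem (pvSpan a b) m
  have ha : a ∈ pvSpan a b := pv_mem_span.mpr (by constructor <;> omega)
  have hb : b ∈ pvSpan a b := pv_mem_span.mpr (by constructor <;> omega)
  have hA := h1.2 a ha
  have hB := h1.2 b hb
  rcases h2 with h2 | h2
  · omega
  · have := pv_mem_span.mp h2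
    omega

theorem pv_foldl_const_max_of_le {c m : Int} (l : List Int) (h : c ≤ m) :
    l.foldl (fun m _ => max m c) m = m := by
  induction l generalizing m with
  | nil => rfl
  | cons a t ih => simpa [max_eq_left h] using ih h

theorem pv_foldl_const_max {c m : Int} (l : List Int) (hl : l ≠ []) :
    l.foldl (fun m _ => max m c) m = max m c := by
  cases l with
  | nil => exact absurd rfl hl
  | cons a t => simpa using pv_foldl_const_max_of_le t (le_max_right m c)

-- A's inner y-loop, split into its two independent components
theorem pv_inner_split (Y : List Int) (x : Int) :
    ∀ (r : List (Int × Int)) (my : Int),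
    Y.foldl (fun st y => (PySem.Set.add st.1 (x, y), if y > st.2 then y else st.2)) (r, my)
      = (Y.foldl (fun r y => PySem.Set.add r (x, y)) r, Y.foldl max my) := by
  induction Y with
  | nil => intro r my; rfl
  | cons a t ih =>
    intro r my
    have : (if a > my then a else my) = max my a := by
      split <;> omega
    simp only [List.foldl_cons, this]
    exact ih _ _

-- A's x-loop, split into its four independent components
theorem pv_x_split (X Y : List Int) :
    ∀ (st : (List (Int × Int)) × Int × Int × Int),
    X.foldl (fun st x =>
        let inner := Y.foldl (fun st y =>
          (PySem.Set.add st.1 (x, y), if y > st.2 then y else st.2)) (st.1, st.2.1)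
        (inner.1, inner.2,
         (if x < st.2.2.1 then x else st.2.2.1),
         (if x > st.2.2.2 then x else st.2.2.2))) st
      = (X.foldl (fun r x => Y.foldl (fun r y => PySem.Set.add r (x, y)) r) st.1,
         X.foldl (fun m _ => Y.foldl max m) st.2.1,
         X.foldl min st.2.2.1,
         X.foldl max st.2.2.2) := by
  induction X with
  | nil => intro st; rfl
  | cons a t ih =>
    intro st
    obtain ⟨r, my, mn, mx⟩ := st
    have hmin : (if a < mn then a else mn) = min mn a := by split <;> omega
    have hmax : (if a > mx then a else mx) = max mx a := by split <;> omega
    rw [List.foldl_cons, ih]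
    simp only [List.foldl_cons, pv_inner_split, hmin, hmax]

-- the pair-fold over indices equals the fold over zipped consecutive pairs (Nat version)
theorem pv_fold_pairs_nat {S : Type} (f : S → Int × Int → Int × Int → S) :
    ∀ (l : List String) (st : S),
    (List.range (l.length - 1)).foldl (fun st k =>
        match l[k]?.bind pvParsePt, l[k + 1]?.bind pvParsePt with
        | some (x1, y1), some (x2, y2) => f st (x1, y1) (x2, y2)
        | _, _ => st) st
      = (l.zip l.tail).foldl (fun st pq =>
          match pvParsePt pq.1, pvParsePt pq.2 with
          | some (x1, y1), some (x2, y2) => f st (x1, y1) (x2, y2)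
          | _, _ => st) st := by
  intro l
  induction l with
  | nil => intro st; rfl
  | cons a t ih =>
    cases t with
    | nil => intro st; rfl
    | cons b t' =>
      intro st
      simp only [List.length_cons, Nat.add_sub_cancel, List.range_succ_eq_map,
        List.foldl_cons, List.foldl_map, List.getElem?_cons_succ, List.getElem?_cons_zero,
        Option.bind_some, List.zip_cons_cons, List.tail_cons]
      exact ih _

theorem pv_fold_pairs {S : Type} (f : S → Int × Int → Int × Int → S)
    (l : List String) (st : S) :
    (PySem.List.pyRange 0 ((l.length : Int) - 1) 1).foldl (fun st i =>
        match (PySem.List.pyGet? l i).bind pvParsePt, (PySem.List.pyGet? l (i + 1)).bind pvParsePt with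
        | some (x1, y1), some (x2, y2) => f st (x1, y1) (x2, y2)
        | _, _ => st) st
      = (l.zip l.tail).foldl (fun st pq =>
          match pvParsePt pq.1, pvParsePt pq.2 with
          | some (x1, y1), some (x2, y2) => f st (x1, y1) (x2, y2)
          | _, _ => st) st := by
  rw [PySem.List.pyRange_one, List.foldl_map]
  have hlen : (((l.length : Int) - 1) - 0).toNat = l.length - 1 := by omega
  rw [hlen, ← pv_fold_pairs_nat f l st]
  apply PySem.List.foldl_congr_mem
  intro acc k _
  have h2 : (k : Int) + 1 = (((k + 1 : Nat)) : Int) := by push_cast; ring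
  simp only [zero_add, h2, PySem.List.pyGet?_natCast]

-- B's per-pair step function for the proof, in pair form (rocks + per-segment bounds)
def pvBStep (st : (List (Int × Int)) × Int × Int × Int) (p q : Int × Int) :
    (List (Int × Int)) × Int × Int × Int :=
  (PySem.Set.update st.1 (pvCells p.1 p.2 q.1 q.2),
   max (max st.2.1 p.2) q.2,
   min (min st.2.2.1 p.1) q.1,
   max (max st.2.2.2 p.1) q.1)

-- one segment of A equals pvBStep
theorem pv_segment (x1 y1 x2 y2 : Int) (st : (List (Int × Int)) × Int × Int × Int) :
    (PySem.List.pyRange x1 (x2 + if x1 ≤ x2 then 1 else -1) (if x1 ≤ x2 then 1 else -1)).foldl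
      (fun st x =>
        let inner := (PySem.List.pyRange y1 (y2 + if y1 ≤ y2 then 1 else -1)
            (if y1 ≤ y2 then 1 else -1)).foldl (fun st y =>
          (PySem.Set.add st.1 (x, y), if y > st.2 then y else st.2)) (st.1, st.2.1)
        (inner.1, inner.2,
         (if x < st.2.2.1 then x else st.2.2.1),
         (if x > st.2.2.2 then x else st.2.2.2))) st
      = pvBStep st (x1, y1) (x2, y2) := by
  have hX : PySem.List.pyRange x1 (x2 + if x1 ≤ x2 then 1 else -1) (if x1 ≤ x2 then 1 else -1)
      = pvSpan x1 x2 := by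
    by_cases h : x1 ≤ x2 <;> simp [pvSpan, h, sub_eq_add_neg]
  have hY : PySem.List.pyRange y1 (y2 + if y1 ≤ y2 then 1 else -1) (if y1 ≤ y2 then 1 else -1)
      = pvSpan y1 y2 := by
    by_cases h : y1 ≤ y2 <;> simp [pvSpan, h, sub_eq_add_neg]
  rw [hX, hY, pv_x_split]
  unfold pvBStep
  rw [pv_cells_eq]
  refine Prod.ext ?_ (Prod.ext ?_ (Prod.ext ?_ ?_))
  · -- rocks: nested add-fold = update with the flatMap of cells
    show _ = PySem.Set.update st.1
        ((pvSpan x1 x2).flatMap (fun x => (pvSpan y1 y2).map (fun y => (x, y))))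
    unfold PySem.Set.update
    rw [List.foldl_flatMap]
    exact PySem.List.foldl_congr_mem _ _ _ _ (fun acc x _ => by rw [List.foldl_map])
  · -- max_y
    show (pvSpan x1 x2).foldl (fun m _ => (pvSpan y1 y2).foldl max m) st.2.1
        = max (max st.2.1 y1) y2
    calc (pvSpan x1 x2).foldl (fun m _ => (pvSpan y1 y2).foldl max m) st.2.1
        = (pvSpan x1 x2).foldl (fun m _ => max m (max y1 y2)) st.2.1 :=
          PySem.List.foldl_congr_mem _ _ _ _ (fun acc x _ => pv_span_foldl_max y1 y2 acc)
      _ = max st.2.1 (max y1 y2) := pv_foldl_const_max _ (pv_span_ne_nil x1 x2)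
      _ = max (max st.2.1 y1) y2 := by omega
  · show (pvSpan x1 x2).foldl min st.2.2.1 = min (min st.2.2.1 x1) x2
    rw [pv_span_foldl_min]; omega
  · show (pvSpan x1 x2).foldl max st.2.2.2 = max (max st.2.2.2 x1) x2
    rw [pv_span_foldl_max]; omega

-- parsing every point succeeds → pvParseAll is some
theorem pv_parse_all_some (l : List String)
    (h : ∀ p ∈ l, (pvParsePt p).isSome = true) : (pvParseAll l).isSome = true := by
  induction l with
  | nil => rfl
  | cons p t ih =>
    have hp := h p (by simp)
    have ht := ih (fun q hq => h q (by simp [hq]))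
    rcases hxy : pvParsePt p with _ | xy
    · rw [hxy] at hp; simp at hp
    · rcases hr : pvParseAll t with _ | r
      · rw [hr] at ht; simp at ht
      · simp [pvParseAll, hxy, hr]

theorem pv_parse_all_length : ∀ (l : List String) (l' : List (Int × Int)),
    pvParseAll l = some l' → l'.length = l.length := by
  intro l
  induction l with
  | nil => intro l' h; simp [pvParseAll] at h; simp [← h]
  | cons p t ih =>
    intro l' h
    simp only [pvParseAll] at h
    rcases hxy : pvParsePt p with _ | xy <;> rw [hxy] at h
    · exact absurd h (by simp)
    · rcases hr : pvParseAll t with _ | r <;> rw [hr] at h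
      · exact absurd h (by simp)
      · simp only [Option.some.injEq] at h
        simp [← h, ih r hr]

-- the string-pair fold with in-loop parsing = the int-pair fold over the parsed list
theorem pv_parse_all_fold {S : Type} (g : S → Int × Int → Int × Int → S) :
    ∀ (l : List String) (l' : List (Int × Int)), pvParseAll l = some l' → ∀ (st : S),
    (l.zip l.tail).foldl (fun st pq =>
        match pvParsePt pq.1, pvParsePt pq.2 with
        | some (x1, y1), some (x2, y2) => g st (x1, y1) (x2, y2)
        | _, _ => st) st
      = (l'.zip l'.tail).foldl (fun st pq => g st pq.1 pq.2) st := by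
  intro l
  induction l with
  | nil =>
    intro l' h st
    simp only [pvParseAll, Option.some.injEq] at h
    simp [← h]
  | cons p t ih =>
    intro l' h st
    simp only [pvParseAll] at h
    rcases hxy : pvParsePt p with _ | xy <;> rw [hxy] at h
    · exact absurd h (by simp)
    · rcases hr : pvParseAll t with _ | r <;> rw [hr] at h
      · exact absurd h (by simp)
      · simp only [Option.some.injEq] at h
        subst h
        cases t with
        | nil =>
          simp only [pvParseAll, Option.some.injEq] at hr
          simp [← hr]
        | cons q t2 =>
          simp only [pvParseAll] at hr
          rcases hq : pvParsePt q with _ | b <;> rw [hq] at hr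
          · exact absurd hr (by simp)
          · rcases hr2 : pvParseAll t2 with _ | r2 <;> rw [hr2] at hr
            · exact absurd hr (by simp)
            · simp only [Option.some.injEq] at hr
              subst hr
              simp only [List.tail_cons, List.zip_cons_cons, List.foldl_cons, hxy, hq]
              obtain ⟨x1, y1⟩ := xy
              obtain ⟨x2, y2⟩ := b
              exact ih ((x2, y2) :: r2) (by simp [pvParseAll, hq, hr2]) _

-- the pvBStep fold, split into its four independent components
theorem pv_pair_split (P : List ((Int × Int) × (Int × Int))) :
    ∀ (st : (List (Int × Int)) × Int × Int × Int),
    P.foldl (fun st pq => pvBStep st pq.1 pq.2) st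
      = (P.foldl (fun r pq => PySem.Set.update r (pvCells pq.1.1 pq.1.2 pq.2.1 pq.2.2)) st.1,
         P.foldl (fun m pq => max (max m pq.1.2) pq.2.2) st.2.1,
         P.foldl (fun m pq => min (min m pq.1.1) pq.2.1) st.2.2.1,
         P.foldl (fun m pq => max (max m pq.1.1) pq.2.1) st.2.2.2) := by
  induction P with
  | nil => intro st; rfl
  | cons a t ih =>
    intro st
    rw [List.foldl_cons, ih]
    rfl

-- scalar fold over consecutive pairs = global fold over the list, for a right-idempotent op
theorem pv_zip_fold_op (op : Int → Int → Int) (hid : ∀ z y, op (op z y) y = op z y)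
    (f : Int × Int → Int) :
    ∀ (t : List (Int × Int)) (a : Int × Int) (m : Int), t ≠ [] →
    ((a :: t).zip t).foldl (fun m pq => op (op m (f pq.1)) (f pq.2)) m
      = t.foldl (fun m q => op m (f q)) (op m (f a)) := by
  intro t
  induction t with
  | nil => intro a m h; exact absurd rfl h
  | cons b t2 ih =>
    intro a m _
    simp only [List.zip_cons_cons, List.foldl_cons]
    cases t2 with
    | nil => rfl
    | cons c t3 =>
      rw [ih b _ (by simp)]
      simp only [List.foldl_cons]
      rw [hid]

-- ===== VERDICT (by name: the statement is the Claim_ definition above) =====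
theorem generate_rocks_spec : Claim_equal_generate_rocks := by
  intro rocks line max_y min_x max_x _ hpre
  unfold Spec_generate_rocks generate_rocks generate_rocks_alt
  dsimp only
  set pts0 := (PySem.Str.split? line " -> ").getD [] with hpts0
  unfold Pre_generate_rocks at hpre
  rw [← hpts0] at hpre
  by_cases hlen : pts0.length > 1
  · -- the path has at least two points: Pre_ gives that every point parses
    have hall : ∀ p ∈ pts0, (pvParsePt p).isSome = true := by
      rcases hpre with h | h
      · omega
      · exact h
    obtain ⟨pts, hpts⟩ := Option.isSome_iff_exists.mp (pv_parse_all_some pts0 hall)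
    rw [if_pos hlen, hpts]
    have hstep : (fun (st : (List (Int × Int)) × Int × Int × Int) (i : Int) =>
        match (PySem.List.pyGet? pts0 i).bind pvParsePt,
              (PySem.List.pyGet? pts0 (i + 1)).bind pvParsePt with
        | some (x1, y1), some (x2, y2) =>
          (PySem.List.pyRange x1 (x2 + if x1 ≤ x2 then 1 else -1) (if x1 ≤ x2 then 1 else -1)).foldl
            (fun st x =>
              let inner := (PySem.List.pyRange y1 (y2 + if y1 ≤ y2 then 1 else -1)
                  (if y1 ≤ y2 then 1 else -1)).foldl (fun st y =>
                (PySem.Set.add st.1 (x, y), if y > st.2 then y else st.2)) (st.1, st.2.1)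
              (inner.1, inner.2,
               (if x < st.2.2.1 then x else st.2.2.1),
               (if x > st.2.2.2 then x else st.2.2.2))) st
        | _, _ => st)
        = (fun st i =>
        match (PySem.List.pyGet? pts0 i).bind pvParsePt,
              (PySem.List.pyGet? pts0 (i + 1)).bind pvParsePt with
        | some (x1, y1), some (x2, y2) => pvBStep st (x1, y1) (x2, y2)
        | _, _ => st) := by
      funext st i
      rcases hp : (PySem.List.pyGet? pts0 i).bind pvParsePt with _ | ⟨x1, y1⟩ <;>
        rcases hq : (PySem.List.pyGet? pts0 (i + 1)).bind pvParsePt with _ | ⟨x2, y2⟩ <;>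
        simp only
      exact pv_segment x1 y1 x2 y2 st
    rw [hstep, pv_fold_pairs pvBStep, pv_parse_all_fold pvBStep pts0 pts hpts,
        pv_pair_split]
    -- now both sides are explicit 4-tuples over pts; compare componentwise
    have hlen' : pts.length > 1 := by rw [pv_parse_all_length pts0 pts hpts]; exact hlen
    obtain ⟨a, t, rfl⟩ : ∃ a t, pts = a :: t := by
      cases pts with
      | nil => simp at hlen'
      | cons a t => exact ⟨a, t, rfl⟩
    have ht : t ≠ [] := by
      intro h; rw [h] at hlen'; simp at hlen'
    simp only [List.tail_cons, List.map_cons, List.foldl_cons, List.foldl_map]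
    refine Prod.ext rfl (Prod.ext ?_ (Prod.ext ?_ ?_)) <;> dsimp only
    · rw [pv_zip_fold_op max (fun z y => by omega) Prod.snd t _ _ ht]
    · rw [pv_zip_fold_op min (fun z y => by omega) Prod.fst t _ _ ht]
    · rw [pv_zip_fold_op max (fun z y => by omega) Prod.fst t _ _ ht]
  · -- at most one point: A's index range is empty, B takes its else-branch
    rw [if_neg hlen]
    have : PySem.List.pyRange 0 ((pts0.length : Int) - 1) 1 = [] := by
      apply PySem.List.pyRange_one_eq_nil; omega
    rw [this]
    rfl
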